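-- pv_equiv track=rewrite | github.com/hg522/KeyPointDetection | KeyPointDetection.py | doPadding
-- ===== SOURCE A (Python) =====
-- def copyImage(img):
--     im = []
--     for row in img:
--         temp=[]
--         for col in row:
--             temp.append(col)
--         im.append(temp)
--     return im
--
-- def doPadding(img,pd):
--     rimg = copyImage(img)
--     for row in rimg:
--         for i in range(pd):
--             row.insert(0,row[0])
--             row.append(row[len(row)-1])
--     #zeroarray = [0.0]*len(rimg[0])
--     for i in range(pd):
--         rimg.insert(0,rimg[0])
--         rimg.append(rimg[len(rimg)-1])
--     return rimg
-- ===== SOURCE B (Python) =====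
-- def doPadding(img, pd):
--     p = max(pd, 0)
--     H = len(img)
--     rows = [[r[min(max(j - p, 0), len(r) - 1)] for j in range(len(r) + 2 * p)]
--             for r in img]
--     return [rows[min(max(i - p, 0), H - 1)] for i in range(H + 2 * p)]
-- ===== Notes on version B (the rewrite author's own statement) =====
-- stated objective: alternative
-- what changed: B builds the padded grid directly by mapping each output coordinate to a clamped source index (out[i][j] = img[clamp(i-p)][clamp(j-p)]), instead of A's repeated insert-at-front/append growth of copied lists.
import Mathlib
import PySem

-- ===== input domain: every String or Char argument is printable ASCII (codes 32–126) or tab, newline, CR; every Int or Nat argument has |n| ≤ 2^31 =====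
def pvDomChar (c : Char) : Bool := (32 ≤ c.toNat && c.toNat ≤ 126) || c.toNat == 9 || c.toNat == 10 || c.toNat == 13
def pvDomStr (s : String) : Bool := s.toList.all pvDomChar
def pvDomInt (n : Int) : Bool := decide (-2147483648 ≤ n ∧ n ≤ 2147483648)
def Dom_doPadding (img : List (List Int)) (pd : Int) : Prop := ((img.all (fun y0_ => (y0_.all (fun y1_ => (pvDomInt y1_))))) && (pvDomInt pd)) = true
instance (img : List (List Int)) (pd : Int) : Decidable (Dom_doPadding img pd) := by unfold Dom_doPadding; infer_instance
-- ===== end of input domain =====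

-- B replaces A's repeated insert/append growth with a direct construction of the
-- padded grid by clamped source indexing (objective: alternative decomposition).

-- ===== PORT A =====
-- one padding step on a list: insert first element at front, append last element
def pvStepA {α : Type} (d : α) (r : List α) : List α :=
  let r1 := PySem.List.pyGetD r 0 d :: r
  r1 ++ [PySem.List.pyGetD r1 ((r1.length : Int) - 1) d]

def doPadding (img : List (List Int)) (pd : Int) : List (List Int) :=
  -- copyImage
  let rimg := img.foldl (fun im row => im ++ [row.foldl (fun t c => t ++ [c]) []]) []
  -- for row in rimg: for i in range(pd): row.insert(0,row[0]); row.append(row[-1])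
  let rimg := rimg.map (fun row => (PySem.List.pyRange 0 pd 1).foldl (fun r _ => pvStepA 0 r) row)
  -- for i in range(pd): rimg.insert(0,rimg[0]); rimg.append(rimg[-1])
  (PySem.List.pyRange 0 pd 1).foldl (fun g _ => pvStepA ([] : List Int) g) rimg

-- ===== PORT B =====
def pvClamp (i : Int) (n : Nat) : Int := min (max i 0) ((n : Int) - 1)

def doPadding_alt (img : List (List Int)) (pd : Int) : List (List Int) :=
  let p : Int := max pd 0
  let rows := img.map (fun r =>
    (PySem.List.pyRange 0 ((r.length : Int) + 2 * p) 1).map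
      (fun j => r.getD (pvClamp (j - p) r.length).toNat 0))
  (PySem.List.pyRange 0 ((img.length : Int) + 2 * p) 1).map
    (fun i => rows.getD (pvClamp (i - p) img.length).toNat [])

-- ===== PRECONDITION & SPEC =====
-- Pre_ excludes exactly the inputs where A raises IndexError: pd > 0 with an empty
-- image or an empty row (row[0] / rimg[0] on an empty list).
def Pre_doPadding (img : List (List Int)) (pd : Int) : Prop :=
  pd ≤ 0 ∨ (img ≠ [] ∧ ∀ r ∈ img, r ≠ [])
instance (img : List (List Int)) (pd : Int) : Decidable (Pre_doPadding img pd) := by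
  unfold Pre_doPadding; infer_instance

def pvWitness_doPadding : List (List Int) × Int := ([[1, 2], [3, 4]], 1)

def Spec_doPadding (img : List (List Int)) (pd : Int) (out : List (List Int)) : Prop := out = doPadding_alt img pd
instance (img : List (List Int)) (pd : Int) (out : List (List Int)) : Decidable (Spec_doPadding img pd out) := by unfold Spec_doPadding; infer_instance

-- ===== CLAIM (what is proved, stated in full; the proofs are below) =====
def Claim_equal_doPadding : Prop := ∀ (img : List (List Int)) (pd : Int), Dom_doPadding img pd → Pre_doPadding img pd → Spec_doPadding img pd (doPadding img pd)

-- ===== LEMMAS AND PROOFS =====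

-- the common value both sides compute per level
def pvPad {α : Type} (p : Nat) (l : List α) (d : α) : List α :=
  List.replicate p (l.headD d) ++ l ++ List.replicate p (l.getLastD d)

theorem pvPad_zero {α : Type} (l : List α) (d : α) : pvPad 0 l d = l := by
  simp [pvPad]

theorem pvPad_succ {α : Type} (p : Nat) (l : List α) (d : α) :
    pvPad (p + 1) l d = l.headD d :: pvPad p l d ++ [l.getLastD d] := by
  simp only [pvPad, List.replicate_succ, List.cons_append, List.append_assoc]
  rw [← List.replicate_succ, List.replicate_succ']

theorem pvFoldl_const {α β : Type} (f : α → α) (l : List β) (s : α) :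
    l.foldl (fun a _ => f a) s = f^[l.length] s := by
  induction l generalizing s with
  | nil => simp
  | cons x t ih => simp [List.foldl_cons, ih, Function.iterate_succ_apply]

theorem pvGetD_last {α : Type} (l : List α) (d : α) (h : l ≠ []) :
    PySem.List.pyGetD l ((l.length : Int) - 1) d = l.getLastD d := by
  have hlen : 0 < l.length := List.length_pos_of_ne_nil h
  rw [PySem.List.pyGetD_eq_getElem l d (by omega) (by omega)]
  rw [List.getLastD_eq_getLast?, List.getLast?_eq_getElem?]
  rw [List.getElem?_eq_getElem (by omega : l.length - 1 < l.length)]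
  simp only [Option.getD_some]
  congr 1
  omega

theorem pvStepA_pad {α : Type} (p : Nat) (l : List α) (d : α) (h : l ≠ []) :
    pvStepA d (pvPad p l d) = pvPad (p + 1) l d := by
  obtain ⟨a, t, rfl⟩ := List.exists_cons_of_ne_nil h
  have hhead : (pvPad p (a :: t) d).headD d = a := by
    cases p with
    | zero => simp [pvPad]
    | succ q => simp [pvPad, List.replicate_succ]
  have hne : pvPad p (a :: t) d ≠ [] := by
    simp [pvPad]
  simp only [pvStepA]
  rw [PySem.List.pyGetD_zero]
  have h0 : (pvPad p (a :: t) d).getD 0 d = a := by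
    rw [List.getD_eq_getElem?_getD]
    cases hp : pvPad p (a :: t) d with
    | nil => exact absurd hp hne
    | cons y ys =>
      have := hhead; rw [hp] at this; simp at this; simp [this]
  rw [h0]
  rw [pvGetD_last _ _ (by simp)]
  have hlast : (a :: pvPad p (a :: t) d).getLastD d = (a :: t).getLastD d := by
    cases p with
    | zero => simp [pvPad]
    | succ q =>
      have : a :: pvPad (q + 1) (a :: t) d
          = (a :: (List.replicate (q + 1) ((a :: t).headD d) ++ (a :: t) ++ List.replicate q ((a :: t).getLastD d))) ++ [(a :: t).getLastD d] := by
        simp [pvPad, List.replicate_succ', List.append_assoc]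
      rw [this, List.getLastD_concat]
  rw [hlast, pvPad_succ]
  simp

theorem pvStepA_iterate {α : Type} (p : Nat) (l : List α) (d : α) (h : l ≠ [] ∨ p = 0) :
    (pvStepA d)^[p] l = pvPad p l d := by
  induction p with
  | zero => simp [pvPad_zero]
  | succ q ih =>
    have hl : l ≠ [] := by
      rcases h with h | h
      · exact h
      · exact absurd h (Nat.succ_ne_zero _)
    rw [Function.iterate_succ_apply', ih (Or.inl hl), pvStepA_pad q l d hl]

-- B's row/grid builder
def pvBuildB {α : Type} (p : Int) (l : List α) (d : α) : List α :=
  (PySem.List.pyRange 0 ((l.length : Int) + 2 * p) 1).map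
    (fun j => l.getD (pvClamp (j - p) l.length).toNat d)

theorem pvBuildB_zero {α : Type} (l : List α) (d : α) : pvBuildB 0 l d = l := by
  unfold pvBuildB
  rw [PySem.List.pyRange_one]
  apply List.ext_getElem
  · simp
  · intro i h1 h2
    simp only [List.getElem_map, List.getElem_range]
    have hi : i < l.length := by simpa using h2
    have hc : pvClamp ((0 : Int) + (i : Int) - 0) l.length = (i : Int) := by
      unfold pvClamp; omega
    rw [hc]
    simp [List.getD_eq_getElem?_getD, List.getElem?_eq_getElem hi]

theorem pvBuildB_succ {α : Type} (q : Nat) (l : List α) (d : α) (h : l ≠ []) :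
    pvBuildB ((q : Int) + 1) l d = l.headD d :: pvBuildB (q : Int) l d ++ [l.getLastD d] := by
  have hn : 0 < l.length := List.length_pos_of_ne_nil h
  unfold pvBuildB
  rw [PySem.List.pyRange_one, PySem.List.pyRange_one]
  rw [show ((l.length : Int) + 2 * ((q : Int) + 1) - 0).toNat = (l.length + 2 * q + 1) + 1 from by omega,
      show ((l.length : Int) + 2 * (q : Int) - 0).toNat = l.length + 2 * q from by omega]
  rw [List.range_succ, List.range_succ_eq_map]
  simp only [List.map_append, List.map_cons, List.map_map, List.map_nil]
  rw [show (pvClamp (0 + ((0 : Nat) : Int) - ((q : Int) + 1)) l.length).toNat = 0 from by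
        unfold pvClamp; omega]
  rw [show (pvClamp (0 + ((l.length + 2 * q + 1 : Nat) : Int) - ((q : Int) + 1)) l.length).toNat = l.length - 1 from by
        unfold pvClamp; omega]
  have hhead : l.getD 0 d = l.headD d := by
    cases l with
    | nil => simp at hn
    | cons a t => simp
  have hlast : l.getD (l.length - 1) d = l.getLastD d := by
    rw [List.getD_eq_getElem?_getD, List.getElem?_eq_getElem (by omega : l.length - 1 < l.length)]
    rw [List.getLastD_eq_getLast?, List.getLast?_eq_getElem?]
    rw [List.getElem?_eq_getElem (by omega : l.length - 1 < l.length)]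
  rw [hhead, hlast]
  congr 2
  apply List.map_congr_left
  intro k _
  simp only [Function.comp_apply]
  have : (0 + ((Nat.succ k : Nat) : Int) - ((q : Int) + 1)) = 0 + (k : Int) - (q : Int) := by
    push_cast; ring
  rw [this]

theorem pvBuildB_pad {α : Type} (p : Nat) (l : List α) (d : α) (h : l ≠ [] ∨ p = 0) :
    pvBuildB (p : Int) l d = pvPad p l d := by
  induction p with
  | zero =>
    simp only [Nat.cast_zero, pvPad_zero]
    exact pvBuildB_zero l d
  | succ q ih =>
    have hl : l ≠ [] := by
      rcases h with h | h
      · exact h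
      · exact absurd h (Nat.succ_ne_zero _)
    have : ((q + 1 : Nat) : Int) = (q : Int) + 1 := by push_cast; ring
    rw [this, pvBuildB_succ q l d hl, ih (Or.inl hl), pvPad_succ]

theorem pvCopy (img : List (List Int)) :
    img.foldl (fun im row => im ++ [row.foldl (fun t c => t ++ [c]) []]) [] = img := by
  have inner : ∀ row : List Int, row.foldl (fun t c => t ++ [c]) [] = row := by
    intro row
    induction row using List.reverseRecOn with
    | nil => simp
    | append_singleton t c ih => simp [List.foldl_append, ih]
  induction img using List.reverseRecOn with
  | nil => simp
  | append_singleton t r ih =>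
    rw [List.foldl_append]
    simp only [List.foldl_cons, List.foldl_nil]
    rw [ih, inner]

-- ===== VERDICT (by name: the statement is the Claim_ definition above) =====
theorem doPadding_spec : Claim_equal_doPadding := by
  intro img pd _ hpre
  unfold Spec_doPadding doPadding doPadding_alt
  have hp : max pd 0 = ((pd.toNat : Nat) : Int) := by omega
  set p : Nat := pd.toNat with hpdef
  have hlen : (PySem.List.pyRange 0 pd 1).length = p := by
    rw [PySem.List.length_pyRange_one]; omega
  have hrowcase : ∀ r : List Int, r ∈ img → (r ≠ [] ∨ p = 0) := by
    intro r hr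
    rcases hpre with h | ⟨_, hall⟩
    · right; omega
    · left; exact hall r hr
  have hrows : img.map (fun row => (PySem.List.pyRange 0 pd 1).foldl (fun r _ => pvStepA 0 r) row)
      = img.map (fun r => pvBuildB (max pd 0) r 0) := by
    apply List.map_congr_left
    intro r hr
    rw [pvFoldl_const (pvStepA 0) _ r, hlen, pvStepA_iterate p r 0 (hrowcase r hr), hp,
      pvBuildB_pad p r 0 (hrowcase r hr)]
  simp only [pvCopy]
  rw [hrows]
  set rows := img.map (fun r => pvBuildB (max pd 0) r 0) with hrowsdef
  have hne : rows ≠ [] ∨ p = 0 := by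
    rcases hpre with h | ⟨hi, _⟩
    · right; omega
    · left; simp [hrowsdef]; exact hi
  have houter : (PySem.List.pyRange 0 pd 1).foldl (fun g _ => pvStepA ([] : List Int) g) rows
      = pvPad p rows [] := by
    rw [pvFoldl_const (pvStepA ([] : List Int)) _ rows, hlen, pvStepA_iterate p rows [] hne]
  rw [houter]
  have hlenrows : rows.length = img.length := by simp [hrowsdef]
  have : pvBuildB (max pd 0) rows ([] : List Int) = pvPad p rows [] := by
    rw [hp, pvBuildB_pad p rows [] hne]
  rw [← this]
  unfold pvBuildB
  rw [hlenrows]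
  rfl
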